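-- pv_equiv track=rewrite | github.com/migpovrap/Go | Gogame.py | get_adjacent_intersections
-- ===== SOURCE A (Python) =====
-- COLUMNS = ('A','B','C','D','E','F','G','H','I','J','K','L','M','N','O','P','Q','R','S')
--
-- ROWS = (1,2,3,4,5,6,7,8,9,10,11,12,13,14,15,16,17,18,19)
--
-- def new_intersection(col:str,row:int) -> tuple:
--     '''
--     Intersection Constructor, returns an intersection if the given arguments
--     meet the following conditions:
--     the col is a character and the row is an integer.
--
--     Parameters:
--             col(str): A character which for the goban game in this case must\
--             be between A-Z
--             row(int): An integer corresponding to the row, for the goban game\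
--             in this case must be between 1 and 19
--     Returns:
--             return: the intersection
--
--             ValueError: ('new_intersection: invalid arguments) - if the\
--             arguments cannot be validated
--     '''
--     if isinstance(col, str) and isinstance(row, int) \
--         and col in COLUMNS and row in ROWS:
--         return (col, row)
--     raise ValueError('new_intersection: invalid arguments')
--
-- def get_col(i:tuple) -> str:
--     '''
--     Function that gets columns of an intersection
--
--     Parameters:
--             i(tuple): The intersection
--     Returns:
--             return: The column of the intersection
--     '''
--     return i[0]
--
-- def get_row(i:tuple) -> int:
--     '''
--     Function that gets the row of an intersection
--
--     Parameters:
--             i(tuple): the intersection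
--     Returns:
--             return: intersection row
--     '''
--     return i[1]
--
-- def get_adjacent_intersections(i:tuple, l:tuple) -> tuple:
--     '''
--     Gets the intersections that are adjacent to a given intersection, which\
--     are located above, below, left, or right.
--
--     Parameters:
--             i(tuple): the intersection
--             l(tuple): last intersection (top right corner) of the goban board\
--             we are considering
--     Returns:
--             return(tuple): A tuple that contains the adjacent intersections\
--             in reading order
--     '''
--     adjacent_vectors = [(-1, 0), (0, -1), (1, 0), (0, 1)]
--     adj_intersec = []
--
--     for vec in adjacent_vectors:
--         col_index = COLUMNS.index(get_col(i)) + vec[0]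
--         row = get_row(i) + vec[1]
--         if 0 <= col_index < len(COLUMNS) and 1 <= row <= get_row(l):
--             col = COLUMNS[col_index]
--             if col <= get_col(l):
--                 adj_intersec.append(new_intersection(col, row))
--
--     return sort_intersections(tuple(adj_intersec))
--
-- def sort_intersections(tup:tuple) -> tuple:
--     '''
--     Sorts the provided tuple of intersections according to the reading order\
--     of the Goban board.
--
--     Parameters:
--             t(tuple): the tuple of intersections
--     Returns:
--             return(tuple): same tuple but with the intersections sorted
--     '''
--     return tuple(sorted(tup, key=lambda i: (get_row(i), get_col(i))))
-- ===== SOURCE B (Python) =====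
-- COLUMNS = ('A','B','C','D','E','F','G','H','I','J','K','L','M','N','O','P','Q','R','S')
--
-- ROWS = (1,2,3,4,5,6,7,8,9,10,11,12,13,14,15,16,17,18,19)
--
-- def get_adjacent_intersections(i, l):
--     # Scan the whole board (ROWS x COLUMNS, cut down by the last intersection l)
--     # in reading order and keep every intersection at Manhattan distance 1 from i.
--     return tuple((c, r)
--                  for r in ROWS if r <= l[1]
--                  for c in COLUMNS if c <= l[0]
--                  and abs(ord(c) - ord(i[0])) + abs(r - i[1]) == 1)
-- ===== Notes on version B (the rewrite author's own statement) =====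
-- stated objective: alternative
-- what changed: B replaces A's loop over four direction vectors (COLUMNS.index arithmetic, bounds guards, then a sort of the collected neighbours) by a single reading-order scan of the whole board (ROWS x COLUMNS cut down by l) that keeps every intersection at Manhattan distance 1 from i, so neither neighbour generation nor sorting appears.
import Mathlib
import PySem

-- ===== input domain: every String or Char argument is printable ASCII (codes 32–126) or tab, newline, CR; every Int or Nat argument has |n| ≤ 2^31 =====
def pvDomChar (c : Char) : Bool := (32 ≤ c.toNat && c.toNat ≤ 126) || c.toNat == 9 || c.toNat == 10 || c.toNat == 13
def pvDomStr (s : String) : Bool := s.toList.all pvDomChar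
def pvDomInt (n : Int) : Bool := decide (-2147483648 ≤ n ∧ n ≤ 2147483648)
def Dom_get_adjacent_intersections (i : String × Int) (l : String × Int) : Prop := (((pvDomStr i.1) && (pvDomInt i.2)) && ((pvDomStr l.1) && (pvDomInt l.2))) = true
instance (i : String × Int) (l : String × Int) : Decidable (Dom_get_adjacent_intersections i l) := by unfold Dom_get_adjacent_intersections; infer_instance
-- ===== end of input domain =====

-- B replaces A's offset-vector generation plus final sort by a single reading-order
-- scan of the board (ROWS × COLUMNS cut down by l) keeping the intersections at
-- Manhattan distance 1 from i. Objective: alternative (B is not faster).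

-- ===== PORT A =====
def pvCOLUMNS : List String :=
  ["A","B","C","D","E","F","G","H","I","J","K","L","M","N","O","P","Q","R","S"]

def pvROWS : List Int :=
  [1,2,3,4,5,6,7,8,9,10,11,12,13,14,15,16,17,18,19]

-- new_intersection: none = the ValueError branch (excluded by Pre_)
def new_intersection? (col : String) (row : Int) : Option (String × Int) :=
  if col ∈ pvCOLUMNS ∧ row ∈ pvROWS then some (col, row) else none

-- loop body of A's for-loop, kept as a helper
def pvStepA (i : String × Int) (l : String × Int) (acc : List (String × Int)) (vec : Int × Int) : List (String × Int) :=
  let col_index : Int := (((PySem.List.index? pvCOLUMNS i.1).getD 0 : Nat) : Int) + vec.1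
  let row : Int := i.2 + vec.2
  if 0 ≤ col_index ∧ col_index < ((pvCOLUMNS.length : Nat) : Int) ∧ 1 ≤ row ∧ row ≤ l.2 then
    let col := PySem.List.pyGetD pvCOLUMNS col_index ""
    if col ≤ l.1 then
      match new_intersection? col row with
      | some t => acc ++ [t]
      | none => acc      -- Python raises ValueError here; excluded by Pre_
    else acc
  else acc

def get_adjacent_intersections (i : String × Int) (l : String × Int) : List (String × Int) :=
  let adjacent_vectors : List (Int × Int) := [(-1, 0), (0, -1), (1, 0), (0, 1)]
  let adj_intersec : List (String × Int) := adjacent_vectors.foldl (pvStepA i l) []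
  PySem.List.sorted2 adj_intersec (fun t => t.2) (fun t => t.1)

-- ===== PORT B =====
-- ord(s): exact for the 1-character strings B applies it to (Python raises otherwise;
-- excluded by Pre_)
def pvOrd (s : String) : Int :=
  match s.toList with
  | [c] => (c.toNat : Int)
  | _ => 0

def get_adjacent_intersections_alt (i : String × Int) (l : String × Int) : List (String × Int) :=
  pvROWS.flatMap (fun r =>
    if r ≤ l.2 then
      (pvCOLUMNS.filter (fun c =>
        decide (c ≤ l.1 ∧ (pvOrd c - pvOrd i.1).natAbs + (r - i.2).natAbs = 1))).map
        (fun c => (c, r))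
    else [])

-- ===== PRECONDITION & SPEC =====
-- Pre_ = exactly the inputs on which the Python A returns: i's column is on the
-- board (else COLUMNS.index raises ValueError) and no neighbour that passes A's
-- guards has a row above 19 (else new_intersection raises ValueError).
def Pre_get_adjacent_intersections (i : String × Int) (l : String × Int) : Prop :=
  i.1 ∈ pvCOLUMNS ∧
  ¬ (20 ≤ i.2 - 1 ∧ i.2 - 1 ≤ l.2 ∧ i.1 ≤ l.1) ∧
  ¬ (20 ≤ i.2 ∧ i.2 ≤ l.2 ∧
      ((1 ≤ pvCOLUMNS.idxOf i.1 ∧ pvCOLUMNS.getD (pvCOLUMNS.idxOf i.1 - 1) "" ≤ l.1) ∨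
       (pvCOLUMNS.idxOf i.1 + 1 ≤ 18 ∧ pvCOLUMNS.getD (pvCOLUMNS.idxOf i.1 + 1) "" ≤ l.1))) ∧
  ¬ (20 ≤ i.2 + 1 ∧ i.2 + 1 ≤ l.2 ∧ i.1 ≤ l.1)
instance (i : String × Int) (l : String × Int) : Decidable (Pre_get_adjacent_intersections i l) := by
  unfold Pre_get_adjacent_intersections; infer_instance

def pvWitness_get_adjacent_intersections : (String × Int) × (String × Int) := (("B", 2), ("S", 19))

def Spec_get_adjacent_intersections (i : String × Int) (l : String × Int) (out : List (String × Int)) : Prop := out = get_adjacent_intersections_alt i l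
instance (i : String × Int) (l : String × Int) (out : List (String × Int)) : Decidable (Spec_get_adjacent_intersections i l out) := by unfold Spec_get_adjacent_intersections; infer_instance

-- ===== CLAIM (what is proved, stated in full; the proofs are below) =====
def Claim_equal_get_adjacent_intersections : Prop := ∀ (i : String × Int) (l : String × Int), Dom_get_adjacent_intersections i l → Pre_get_adjacent_intersections i l → Spec_get_adjacent_intersections i l (get_adjacent_intersections i l)

-- ===== LEMMAS AND PROOFS =====

-- the four conditional blocks, in reading order, both ports are reduced to
def pvBlocks (i : String × Int) (l : String × Int) : List (String × Int) :=
  let idx : Nat := (PySem.List.index? pvCOLUMNS i.1).getD 0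
  (if 1 ≤ i.2 - 1 ∧ i.2 - 1 ≤ l.2 ∧ i.1 ≤ l.1 then [(i.1, i.2 - 1)] else []) ++
  (if 0 < idx ∧ 1 ≤ i.2 ∧ i.2 ≤ l.2 ∧ pvCOLUMNS.getD (idx - 1) "" ≤ l.1 then
      [(pvCOLUMNS.getD (idx - 1) "", i.2)] else []) ++
  (if idx < pvCOLUMNS.length - 1 ∧ 1 ≤ i.2 ∧ i.2 ≤ l.2 ∧ pvCOLUMNS.getD (idx + 1) "" ≤ l.1 then
      [(pvCOLUMNS.getD (idx + 1) "", i.2)] else []) ++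
  (if 1 ≤ i.2 + 1 ∧ i.2 + 1 ≤ l.2 ∧ i.1 ≤ l.1 then [(i.1, i.2 + 1)] else [])

-- sorted2 with keys (row, col) is sorted under the lexicographic key
theorem pv_sorted2_eq_sorted (xs : List (String × Int)) :
    PySem.List.sorted2 xs (fun t => t.2) (fun t => t.1) =
    PySem.List.sorted xs (fun t => toLex (t.2, t.1)) := by
  have hbef : (fun (x y : String × Int) => decide (x.2 < y.2) || (!decide (y.2 < x.2) && decide (x.1 < y.1)))
      = fun x y => decide (toLex (x.2, x.1) < toLex (y.2, y.1)) := by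
    funext x y
    rcases lt_trichotomy x.2 y.2 with h | h | h
    · simp [Prod.Lex.lt_iff, h, lt_asymm h]
    · simp [Prod.Lex.lt_iff, h]
    · simp [Prod.Lex.lt_iff, h, lt_asymm h, ne_of_gt h]
  rw [PySem.List.sorted_eq_foldl_insertBy]
  simp only [PySem.List.sorted2, hbef]
  simp

-- sorting A's four conditional blocks by (row, col) yields B's reading order
theorem pv_sort4 (colA colL colR : String) (r : Int)
    (c1 c2 c3 c4 : Prop) [Decidable c1] [Decidable c2] [Decidable c3] [Decidable c4]
    (hLR : c2 → c3 → colL < colR) :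
    PySem.List.sorted2
      ((if c2 then [(colL, r)] else []) ++ ((if c1 then [(colA, r - 1)] else []) ++
       ((if c3 then [(colR, r)] else []) ++ (if c4 then [(colA, r + 1)] else []))))
      (fun t => t.2) (fun t => t.1)
    = (if c1 then [(colA, r - 1)] else []) ++ ((if c2 then [(colL, r)] else []) ++
      ((if c3 then [(colR, r)] else []) ++ (if c4 then [(colA, r + 1)] else []))) := by
  rw [pv_sorted2_eq_sorted]
  apply PySem.List.sorted_eq_of_perm_of_pairwise_lt
  · have := List.Perm.append_right
      ((if c3 then [(colR, r)] else []) ++ (if c4 then [(colA, r + 1)] else []))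
      (List.perm_append_comm (l₁ := if c1 then [(colA, r - 1)] else [])
        (l₂ := if c2 then [(colL, r)] else []))
    simpa [List.append_assoc] using this
  · have e1 : r - 1 < r := by omega
    have e2 : r - 1 < r + 1 := by omega
    have e3 : r < r + 1 := by omega
    split_ifs <;>
      simp [List.pairwise_cons, Prod.Lex.lt_iff, e3] <;>
      exact String.lt_iff_toList_lt.mp (hLR ‹c2› ‹c3›)

theorem pv_step_append (i l : String × Int) (acc : List (String × Int)) (vec : Int × Int) :
    pvStepA i l acc vec = acc ++ pvStepA i l [] vec := by
  simp only [pvStepA]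
  generalize new_intersection? _ _ = o
  split_ifs <;> cases o <;> simp

theorem pv_fold (i l : String × Int) :
    [((-1 : Int), (0 : Int)), (0, -1), (1, 0), (0, 1)].foldl (pvStepA i l) [] =
      pvStepA i l [] (-1, 0) ++ (pvStepA i l [] (0, -1) ++ (pvStepA i l [] (1, 0) ++ pvStepA i l [] (0, 1))) := by
  simp only [List.foldl_cons, List.foldl_nil]
  rw [pv_step_append i l _ ((0 : Int), (1 : Int)), pv_step_append i l _ ((1 : Int), (0 : Int)),
      pv_step_append i l _ ((0 : Int), (-1 : Int))]
  simp [List.append_assoc]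

-- A equals the four blocks (old final proof, retargeted at pvBlocks)
theorem pv_A_eq_blocks (i l : String × Int) (hpre : Pre_get_adjacent_intersections i l) :
    get_adjacent_intersections i l = pvBlocks i l := by
  obtain ⟨hmem, h1, h2, h3⟩ := hpre
  have hsome := (PySem.List.index?_isSome_iff pvCOLUMNS i.1).mpr hmem
  obtain ⟨k, hidx⟩ := Option.isSome_iff_exists.mp hsome
  obtain ⟨hklt, hgetk, -⟩ := PySem.List.getElem_of_index?_eq_some hidx
  have hkidx : pvCOLUMNS.idxOf i.1 = k := by
    rw [List.idxOf_eq_getD_idxOf?, ← PySem.List.index?_eq_idxOf?, hidx]; rfl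
  have hlen : pvCOLUMNS.length = 19 := rfl
  rw [hkidx] at h2
  have hk19 : k < 19 := by omega
  have hrows : ∀ r : Int, r ∈ pvROWS ↔ 1 ≤ r ∧ r ≤ 19 := by
    intro r; simp [pvROWS]; omega
  -- the four loop-body results, in A's vector order
  have hbA : pvStepA i l [] (0, -1) =
      (if 1 ≤ i.2 - 1 ∧ i.2 - 1 ≤ l.2 ∧ i.1 ≤ l.1 then [(i.1, i.2 - 1)] else []) := by
    have hcol : PySem.List.pyGetD pvCOLUMNS ((k : Int) + 0) "" = i.1 := by
      rw [show ((k : Int) + 0) = (k : Int) by ring,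
        PySem.List.pyGetD_eq_getElem _ _ (by positivity) (by exact_mod_cast hklt)]
      simpa using hgetk
    by_cases hc : 1 ≤ i.2 - 1 ∧ i.2 - 1 ≤ l.2 ∧ i.1 ≤ l.1
    · have h19 : i.2 - 1 ≤ 19 := by by_contra hx; exact h1 ⟨by omega, hc.2.1, hc.2.2⟩
      have hrow : (i.2 - 1) ∈ pvROWS := (hrows _).mpr ⟨by omega, by omega⟩
      simp only [pvStepA, hidx, Option.getD_some]
      rw [if_pos ⟨by omega, by rw [hlen]; push_cast; omega, by omega, by omega⟩, hcol,
        if_pos hc.2.2, show i.2 + -1 = i.2 - 1 by ring]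
      simp [new_intersection?, hmem, hrow, hc]
    · simp only [pvStepA, hidx, Option.getD_some]
      rw [if_neg hc]
      split_ifs with g1 g2
      · exfalso
        rw [hcol] at g2
        obtain ⟨-, -, g13, g14⟩ := g1
        exact hc ⟨by omega, by omega, g2⟩
      · rfl
      · rfl
  have hbB : pvStepA i l [] (0, 1) =
      (if 1 ≤ i.2 + 1 ∧ i.2 + 1 ≤ l.2 ∧ i.1 ≤ l.1 then [(i.1, i.2 + 1)] else []) := by
    have hcol : PySem.List.pyGetD pvCOLUMNS ((k : Int) + 0) "" = i.1 := by
      rw [show ((k : Int) + 0) = (k : Int) by ring,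
        PySem.List.pyGetD_eq_getElem _ _ (by positivity) (by exact_mod_cast hklt)]
      simpa using hgetk
    by_cases hc : 1 ≤ i.2 + 1 ∧ i.2 + 1 ≤ l.2 ∧ i.1 ≤ l.1
    · have h19 : i.2 + 1 ≤ 19 := by by_contra hx; exact h3 ⟨by omega, hc.2.1, hc.2.2⟩
      have hrow : (i.2 + 1) ∈ pvROWS := (hrows _).mpr ⟨by omega, by omega⟩
      simp only [pvStepA, hidx, Option.getD_some]
      rw [if_pos ⟨by omega, by rw [hlen]; push_cast; omega, by omega, by omega⟩, hcol,
        if_pos hc.2.2]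
      simp [new_intersection?, hmem, hrow, hc]
    · simp only [pvStepA, hidx, Option.getD_some]
      rw [if_neg hc]
      split_ifs with g1 g2
      · exfalso
        rw [hcol] at g2
        obtain ⟨-, -, g13, g14⟩ := g1
        exact hc ⟨by omega, by omega, g2⟩
      · rfl
      · rfl
  have hbL : pvStepA i l [] (-1, 0) =
      (if 0 < k ∧ 1 ≤ i.2 ∧ i.2 ≤ l.2 ∧ pvCOLUMNS.getD (k - 1) "" ≤ l.1 then
        [(pvCOLUMNS.getD (k - 1) "", i.2)] else []) := by
    by_cases hk0 : 0 < k
    · have hcol : PySem.List.pyGetD pvCOLUMNS ((k : Int) + -1) "" = pvCOLUMNS.getD (k - 1) "" := by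
        rw [PySem.List.pyGetD_eq_getElem _ _ (by omega) (by rw [hlen]; push_cast; omega),
          List.getD_eq_getElem _ _ (by omega)]
        simp only [show ((k : Int) + -1).toNat = k - 1 from by omega]
      by_cases hc : 1 ≤ i.2 ∧ i.2 ≤ l.2 ∧ pvCOLUMNS.getD (k - 1) "" ≤ l.1
      · have h19 : i.2 ≤ 19 := by
          by_contra hx; exact h2 ⟨by omega, hc.2.1, Or.inl ⟨by omega, hc.2.2⟩⟩
        have hrow : i.2 ∈ pvROWS := (hrows _).mpr ⟨by omega, by omega⟩
        have hmem' : pvCOLUMNS.getD (k - 1) "" ∈ pvCOLUMNS := by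
          rw [List.getD_eq_getElem _ _ (by omega)]; exact List.getElem_mem _
        have hni : new_intersection? (pvCOLUMNS.getD (k - 1) "") i.2 =
            some (pvCOLUMNS.getD (k - 1) "", i.2) := by
          simp only [new_intersection?]; rw [if_pos ⟨hmem', hrow⟩]
        simp only [pvStepA, hidx, Option.getD_some]
        rw [if_pos ⟨by omega, by rw [hlen]; push_cast; omega, by omega, by omega⟩, hcol,
          if_pos hc.2.2, show i.2 + 0 = i.2 by ring, hni, if_pos ⟨hk0, hc⟩]
        rfl
      · simp only [pvStepA, hidx, Option.getD_some]
        rw [if_neg (show ¬(0 < k ∧ 1 ≤ i.2 ∧ i.2 ≤ l.2 ∧ pvCOLUMNS.getD (k - 1) "" ≤ l.1)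
          from fun hh => hc hh.2)]
        split_ifs with g1 g2
        · exfalso
          rw [hcol] at g2
          obtain ⟨-, -, g13, g14⟩ := g1
          exact hc ⟨by omega, by omega, g2⟩
        · rfl
        · rfl
    · simp only [pvStepA, hidx, Option.getD_some]
      rw [if_neg (show ¬(0 ≤ (k : Int) + -1 ∧ (k : Int) + -1 < (pvCOLUMNS.length : Int) ∧
            1 ≤ i.2 + 0 ∧ i.2 + 0 ≤ l.2) from fun hh => absurd hh.1 (by omega)),
        if_neg (show ¬(0 < k ∧ 1 ≤ i.2 ∧ i.2 ≤ l.2 ∧ pvCOLUMNS.getD (k - 1) "" ≤ l.1)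
          from fun hh => hk0 hh.1)]
  have hbR : pvStepA i l [] (1, 0) =
      (if k < pvCOLUMNS.length - 1 ∧ 1 ≤ i.2 ∧ i.2 ≤ l.2 ∧ pvCOLUMNS.getD (k + 1) "" ≤ l.1 then
        [(pvCOLUMNS.getD (k + 1) "", i.2)] else []) := by
    by_cases hk18 : k < pvCOLUMNS.length - 1
    · have hcol : PySem.List.pyGetD pvCOLUMNS ((k : Int) + 1) "" = pvCOLUMNS.getD (k + 1) "" := by
        rw [PySem.List.pyGetD_eq_getElem _ _ (by omega) (by rw [hlen] at *; push_cast; omega),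
          List.getD_eq_getElem _ _ (by omega)]
        simp only [show ((k : Int) + 1).toNat = k + 1 from by omega]
      by_cases hc : 1 ≤ i.2 ∧ i.2 ≤ l.2 ∧ pvCOLUMNS.getD (k + 1) "" ≤ l.1
      · have h19 : i.2 ≤ 19 := by
          by_contra hx
          exact h2 ⟨by omega, hc.2.1, Or.inr ⟨by rw [hlen] at hk18; omega, hc.2.2⟩⟩
        have hrow : i.2 ∈ pvROWS := (hrows _).mpr ⟨by omega, by omega⟩
        have hmem' : pvCOLUMNS.getD (k + 1) "" ∈ pvCOLUMNS := by
          rw [List.getD_eq_getElem _ _ (by rw [hlen] at *; omega)]; exact List.getElem_mem _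
        have hni : new_intersection? (pvCOLUMNS.getD (k + 1) "") i.2 =
            some (pvCOLUMNS.getD (k + 1) "", i.2) := by
          simp only [new_intersection?]; rw [if_pos ⟨hmem', hrow⟩]
        simp only [pvStepA, hidx, Option.getD_some]
        rw [if_pos ⟨by omega, by rw [hlen] at *; push_cast; omega, by omega, by omega⟩, hcol,
          if_pos hc.2.2, show i.2 + 0 = i.2 by ring, hni, if_pos ⟨hk18, hc⟩]
        rfl
      · simp only [pvStepA, hidx, Option.getD_some]
        rw [if_neg (show ¬(k < pvCOLUMNS.length - 1 ∧ 1 ≤ i.2 ∧ i.2 ≤ l.2 ∧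
            pvCOLUMNS.getD (k + 1) "" ≤ l.1) from fun hh => hc hh.2)]
        split_ifs with g1 g2
        · exfalso
          rw [hcol] at g2
          obtain ⟨-, -, g13, g14⟩ := g1
          exact hc ⟨by omega, by omega, g2⟩
        · rfl
        · rfl
    · simp only [pvStepA, hidx, Option.getD_some]
      rw [if_neg (show ¬(0 ≤ (k : Int) + 1 ∧ (k : Int) + 1 < (pvCOLUMNS.length : Int) ∧
            1 ≤ i.2 + 0 ∧ i.2 + 0 ≤ l.2)
          from fun hh => absurd hh.2.1 (by rw [hlen] at *; push_cast; omega)),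
        if_neg (show ¬(k < pvCOLUMNS.length - 1 ∧ 1 ≤ i.2 ∧ i.2 ≤ l.2 ∧
            pvCOLUMNS.getD (k + 1) "" ≤ l.1) from fun hh => hk18 hh.1)]
  have hLR : (0 < k ∧ 1 ≤ i.2 ∧ i.2 ≤ l.2 ∧ pvCOLUMNS.getD (k - 1) "" ≤ l.1) →
      (k < pvCOLUMNS.length - 1 ∧ 1 ≤ i.2 ∧ i.2 ≤ l.2 ∧ pvCOLUMNS.getD (k + 1) "" ≤ l.1) →
      pvCOLUMNS.getD (k - 1) "" < pvCOLUMNS.getD (k + 1) "" := by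
    intro hc2 hc3
    rw [List.getD_eq_getElem _ _ (by omega),
      List.getD_eq_getElem _ _ (by rw [hlen] at *; omega)]
    have hpw' : pvCOLUMNS.Pairwise (fun a b => a.toList < b.toList) := by decide
    have hpw : pvCOLUMNS.Pairwise (· < ·) :=
      hpw'.imp (fun h => String.lt_iff_toList_lt.mpr h)
    exact List.pairwise_iff_getElem.mp hpw _ _ _ _ (by omega)
  simp only [get_adjacent_intersections, pvBlocks]
  rw [pv_fold i l, hbL, hbA, hbR, hbB, hidx]
  simp only [Option.getD_some, List.append_assoc]
  exact pv_sort4 i.1 (pvCOLUMNS.getD (k - 1) "") (pvCOLUMNS.getD (k + 1) "") i.2 _ _ _ _ hLR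

-- a flatMap over a strictly increasing list whose body vanishes except at a-1, a, a+1
theorem pv_flatMap_three {α : Type} (a : Int) (f : Int → List α) :
    ∀ (L : List Int), L.Pairwise (· < ·) →
    (∀ r, r ≠ a - 1 → r ≠ a → r ≠ a + 1 → f r = []) →
    L.flatMap f = (if a - 1 ∈ L then f (a - 1) else []) ++
      (if a ∈ L then f a else []) ++ (if a + 1 ∈ L then f (a + 1) else []) := by
  intro L
  induction L with
  | nil => intro _ _; simp
  | cons x xs ih =>
    intro hpw hf
    obtain ⟨hgt, hxs⟩ := List.pairwise_cons.mp hpw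
    have ihe := ih hxs hf
    rcases eq_or_ne x (a - 1) with e | e1
    · subst e
      have n1 : a - 1 ∉ xs := fun h => absurd (hgt _ h) (by omega)
      simp [List.flatMap_cons, ihe, List.mem_cons, n1,
        (show ¬(a = a - 1) from by omega), (show ¬(a + 1 = a - 1) from by omega),
        List.append_assoc]
    rcases eq_or_ne x a with e | e2
    · subst e
      have n0 : x - 1 ∉ xs := fun h => absurd (hgt _ h) (by omega)
      have n1 : x ∉ xs := fun h => absurd (hgt _ h) (by omega)
      simp [List.flatMap_cons, ihe, List.mem_cons, n0, n1,
        (show ¬(x - 1 = x) from by omega), (show ¬(x + 1 = x) from by omega)]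
    rcases eq_or_ne x (a + 1) with e | e3
    · subst e
      have n0 : a - 1 ∉ xs := fun h => absurd (hgt _ h) (by omega)
      have n1 : a ∉ xs := fun h => absurd (hgt _ h) (by omega)
      have n2 : a + 1 ∉ xs := fun h => absurd (hgt _ h) (by omega)
      simp [List.flatMap_cons, ihe, List.mem_cons, n0, n1, n2,
        (show ¬(a - 1 = a + 1) from by omega), (show ¬(a = a + 1) from by omega)]
    · have hfx : f x = [] := hf x e1 e2 e3
      simp [List.flatMap_cons, ihe, hfx, List.mem_cons, e1.symm, e2.symm, e3.symm,
        List.append_assoc]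

-- the columns at ord-distance 0 from a board column c0 (also cut by ≤ l1): just c0
theorem pv_colsSame (l1 c0 : String) (h : c0 ∈ pvCOLUMNS) :
    pvCOLUMNS.filter (fun c => decide (c ≤ l1 ∧ (pvOrd c - pvOrd c0).natAbs = 0)) =
    if c0 ≤ l1 then [c0] else [] := by
  fin_cases h <;> simp [pvCOLUMNS, pvOrd, List.filter] <;> split_ifs with hh <;> simp [hh]

-- the columns at ord-distance 1 from board column number k (also cut by ≤ l1)
set_option maxHeartbeats 2000000 in
theorem pv_colsLR (l1 : String) (k : Nat) (hk : k < 19) :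
    pvCOLUMNS.filter (fun c =>
        decide (c ≤ l1 ∧ (pvOrd c - pvOrd (pvCOLUMNS.getD k "")).natAbs = 1)) =
    (if 1 ≤ k ∧ pvCOLUMNS.getD (k - 1) "" ≤ l1 then [pvCOLUMNS.getD (k - 1) ""] else []) ++
    (if k + 1 ≤ 18 ∧ pvCOLUMNS.getD (k + 1) "" ≤ l1 then [pvCOLUMNS.getD (k + 1) ""] else []) := by
  interval_cases k <;> simp [pvCOLUMNS, pvOrd, List.filter] <;> split_ifs <;> simp_all [← not_le]

-- B equals the four blocks
set_option maxHeartbeats 2000000 in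
theorem pv_alt_eq_blocks (i l : String × Int) (hpre : Pre_get_adjacent_intersections i l) :
    get_adjacent_intersections_alt i l = pvBlocks i l := by
  obtain ⟨hmem, h1, h2, h3⟩ := hpre
  have hsome := (PySem.List.index?_isSome_iff pvCOLUMNS i.1).mpr hmem
  obtain ⟨k, hidx⟩ := Option.isSome_iff_exists.mp hsome
  obtain ⟨hklt, hgetk, -⟩ := PySem.List.getElem_of_index?_eq_some hidx
  have hkidx : pvCOLUMNS.idxOf i.1 = k := by
    rw [List.idxOf_eq_getD_idxOf?, ← PySem.List.index?_eq_idxOf?, hidx]; rfl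
  have hlen : pvCOLUMNS.length = 19 := rfl
  rw [hkidx] at h2
  have hk19 : k < 19 := by omega
  have hgetDk : pvCOLUMNS.getD k "" = i.1 := by
    rw [List.getD_eq_getElem _ _ (by omega)]; exact hgetk
  have hrows : ∀ r : Int, r ∈ pvROWS ↔ 1 ≤ r ∧ r ≤ 19 := by
    intro r; simp [pvROWS]; omega
  have hpwR : pvROWS.Pairwise (· < ·) := by decide
  have hf0 : ∀ r : Int, r ≠ i.2 - 1 → r ≠ i.2 → r ≠ i.2 + 1 →
      (fun r => if r ≤ l.2 then
        (pvCOLUMNS.filter (fun c =>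
          decide (c ≤ l.1 ∧ (pvOrd c - pvOrd i.1).natAbs + (r - i.2).natAbs = 1))).map
          (fun c => (c, r))
      else []) r = ([] : List (String × Int)) := by
    intro r hr1 hr2 hr3
    have hnil : pvCOLUMNS.filter (fun c =>
        decide (c ≤ l.1 ∧ (pvOrd c - pvOrd i.1).natAbs + (r - i.2).natAbs = 1)) = [] := by
      refine List.filter_eq_nil_iff.mpr ?_
      intro c _
      simp only [decide_eq_true_eq]
      rintro ⟨-, habs⟩
      omega
    simp only [hnil, List.map_nil, ite_self]
  have key := pv_flatMap_three i.2 _ pvROWS hpwR hf0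
  have hB : get_adjacent_intersections_alt i l = pvROWS.flatMap
      (fun r => if r ≤ l.2 then
        (pvCOLUMNS.filter (fun c =>
          decide (c ≤ l.1 ∧ (pvOrd c - pvOrd i.1).natAbs + (r - i.2).natAbs = 1))).map
          (fun c => (c, r))
      else []) := rfl
  -- the three surviving rows
  have hfm1 : ∀ r : Int, (r - i.2).natAbs = 1 →
      (if r ≤ l.2 then
        (pvCOLUMNS.filter (fun c =>
          decide (c ≤ l.1 ∧ (pvOrd c - pvOrd i.1).natAbs + (r - i.2).natAbs = 1))).map
          (fun c => (c, r))
      else []) = (if r ≤ l.2 ∧ i.1 ≤ l.1 then [(i.1, r)] else []) := by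
    intro r habs
    have hc : pvCOLUMNS.filter (fun c =>
          decide (c ≤ l.1 ∧ (pvOrd c - pvOrd i.1).natAbs + (r - i.2).natAbs = 1)) =
        pvCOLUMNS.filter (fun c => decide (c ≤ l.1 ∧ (pvOrd c - pvOrd i.1).natAbs = 0)) := by
      refine List.filter_congr ?_
      intro c _
      refine decide_eq_decide.mpr ?_
      constructor
      · rintro ⟨hp, hx⟩; exact ⟨hp, by omega⟩
      · rintro ⟨hp, hx⟩; exact ⟨hp, by omega⟩
    rw [hc, pv_colsSame l.1 i.1 hmem]
    by_cases b1 : r ≤ l.2 <;> by_cases b2 : i.1 ≤ l.1 <;> simp [b1, b2]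
  have hfmid :
      (if i.2 ≤ l.2 then
        (pvCOLUMNS.filter (fun c =>
          decide (c ≤ l.1 ∧ (pvOrd c - pvOrd i.1).natAbs + (i.2 - i.2).natAbs = 1))).map
          (fun c => (c, i.2))
      else []) =
      (if i.2 ≤ l.2 then
        ((if 1 ≤ k ∧ pvCOLUMNS.getD (k - 1) "" ≤ l.1 then [(pvCOLUMNS.getD (k - 1) "", i.2)] else []) ++
         (if k + 1 ≤ 18 ∧ pvCOLUMNS.getD (k + 1) "" ≤ l.1 then [(pvCOLUMNS.getD (k + 1) "", i.2)] else []))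
      else []) := by
    have hc : pvCOLUMNS.filter (fun c =>
          decide (c ≤ l.1 ∧ (pvOrd c - pvOrd i.1).natAbs + (i.2 - i.2).natAbs = 1)) =
        pvCOLUMNS.filter (fun c =>
          decide (c ≤ l.1 ∧ (pvOrd c - pvOrd (pvCOLUMNS.getD k "")).natAbs = 1)) := by
      refine List.filter_congr ?_
      intro c _
      refine decide_eq_decide.mpr ?_
      rw [hgetDk]
      constructor
      · rintro ⟨hp, hx⟩; exact ⟨hp, by omega⟩
      · rintro ⟨hp, hx⟩; exact ⟨hp, by omega⟩
    rw [hc, pv_colsLR l.1 k hk19]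
    by_cases b1 : i.2 ≤ l.2 <;>
      simp [b1, List.map_append, apply_ite (List.map (fun c : String => (c, i.2)))]
  rw [hB, key, hfm1 (i.2 - 1) (by omega), hfm1 (i.2 + 1) (by omega), hfmid]
  simp only [pvBlocks, hidx, Option.getD_some, hlen, hrows,
    show (0 < k) = (1 ≤ k) from propext (by omega),
    show (k < 19 - 1) = (k + 1 ≤ 18) from propext (by omega)]
  by_cases s1 : i.1 ≤ l.1 <;>
    by_cases s2 : pvCOLUMNS.getD (k - 1) "" ≤ l.1 <;>
    by_cases s3 : pvCOLUMNS.getD (k + 1) "" ≤ l.1 <;>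
    by_cases hk0 : 1 ≤ k <;>
    by_cases hk18 : k + 1 ≤ 18 <;>
    simp only [s1, s2, s3, hk0, hk18,
      true_and, and_true, false_and, and_false, if_true, if_false,
      or_true, true_or, or_false, false_or, not_false_iff] at h1 h2 h3 ⊢ <;>
    split_ifs <;> first | rfl | omega

-- ===== VERDICT (by name: the statement is the Claim_ definition above) =====
theorem get_adjacent_intersections_spec : Claim_equal_get_adjacent_intersections := by
  intro i l _ hpre
  unfold Spec_get_adjacent_intersections
  rw [pv_A_eq_blocks i l hpre, pv_alt_eq_blocks i l hpre]
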